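-- pv_equiv track=rewrite | github.com/Lismanuga/Projector-Python | HW-9.2/hw_9.py | cats_with_hats_optimized
-- ===== SOURCE A (Python) =====
-- def cats_with_hats_optimized(num_cats, num_rounds):
--     cats = [False] * num_cats  # Початково всі коти мають шапки
--     for round in range(1, num_rounds + 1):
--         for cat_number in range(round - 1, num_cats, round):
--             cats[cat_number] = not cats[cat_number]  # Змінити стан кота
--     cats_with_hats = [
--         cat_number + 1 for cat_number, has_hat in enumerate(cats) if has_hat]
--     return cats_with_hats
-- ===== SOURCE B (Python) =====
-- def cats_with_hats_optimized(num_cats, num_rounds):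
--     parity = [False] * num_cats
--     for d in range(1, num_cats + 1):
--         if d * d <= num_cats:
--             for q in range(d, num_cats // d + 1):
--                 if d <= num_rounds:
--                     parity[d * q - 1] = not parity[d * q - 1]
--                 if q <= num_rounds and q != d:
--                     parity[d * q - 1] = not parity[d * q - 1]
--     return [m + 1 for m, flag in enumerate(parity) if flag]
-- ===== Notes on version B (the rewrite author's own statement) =====
-- stated objective: alternative
-- what changed: Replaces A's round-by-round striding toggle of the cat array (one pass per round, one stride per multiple) by a single enumeration of divisor pairs (d, q) with d <= q and d*q <= num_cats, flipping cat d*q once for each of its divisors (d, and q when distinct) that is <= num_rounds, so the number of passes is bounded by sqrt(num_cats) instead of num_rounds.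
import Mathlib
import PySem

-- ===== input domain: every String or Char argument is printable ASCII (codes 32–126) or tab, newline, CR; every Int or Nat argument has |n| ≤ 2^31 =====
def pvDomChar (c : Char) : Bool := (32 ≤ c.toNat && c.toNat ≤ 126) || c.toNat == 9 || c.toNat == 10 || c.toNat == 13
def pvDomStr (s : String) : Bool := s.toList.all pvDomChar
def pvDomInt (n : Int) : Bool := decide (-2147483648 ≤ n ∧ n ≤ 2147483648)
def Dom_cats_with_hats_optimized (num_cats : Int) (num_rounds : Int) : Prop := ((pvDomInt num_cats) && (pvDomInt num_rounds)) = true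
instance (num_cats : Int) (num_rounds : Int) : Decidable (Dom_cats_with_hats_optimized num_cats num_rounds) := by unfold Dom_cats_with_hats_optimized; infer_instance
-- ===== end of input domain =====

-- B replaces A's round-by-round toggling of a boolean cat array by a per-cat bounded
-- divisor count (cat m gets a hat iff it has an odd number of divisors ≤ num_rounds);
-- objective: alternative (genuinely different algorithm, similar cost).

-- ===== PORT A =====
-- cats[cat_number] = not cats[cat_number]
def pvToggle (cats : List Bool) (cat_number : Int) : List Bool :=
  PySem.List.pySetD cats cat_number (!(PySem.List.pyGetD cats cat_number false))

def cats_with_hats_optimized (num_cats : Int) (num_rounds : Int) : List Int :=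
  let cats0 : List Bool := List.replicate num_cats.toNat false
  let cats :=
    (PySem.List.pyRange 1 (num_rounds + 1) 1).foldl
      (fun cats round =>
        (PySem.List.pyRange (round - 1) num_cats round).foldl pvToggle cats)
      cats0
  -- the final comprehension: one pass over cats with the running index cat_number
  (cats.foldl (fun (p : List Int × Int) has_hat =>
      ((if has_hat then p.1 ++ [p.2 + 1] else p.1), p.2 + 1)) ([], 0)).1

-- ===== PORT B =====
def cats_with_hats_optimized_alt (num_cats : Int) (num_rounds : Int) : List Int :=
  let parity0 : List Bool := List.replicate num_cats.toNat false
  let parity :=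
    (PySem.List.pyRange 1 (num_cats + 1) 1).foldl
      (fun parity d =>
        if d * d ≤ num_cats then
          (PySem.List.pyRange d (PySem.Int.floordiv num_cats d + 1) 1).foldl
            (fun parity q =>
              let parity' := if d ≤ num_rounds then pvToggle parity (d * q - 1) else parity
              if q ≤ num_rounds ∧ q ≠ d then pvToggle parity' (d * q - 1) else parity')
            parity
        else parity)
      parity0
  -- the final comprehension: one pass over parity with the running index m
  (parity.foldl (fun (p : List Int × Int) flag =>
      ((if flag then p.1 ++ [p.2 + 1] else p.1), p.2 + 1)) ([], 0)).1

-- ===== PRECONDITION & SPEC =====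
def Spec_cats_with_hats_optimized (num_cats : Int) (num_rounds : Int) (out : List Int) : Prop := out = cats_with_hats_optimized_alt num_cats num_rounds
instance (num_cats : Int) (num_rounds : Int) (out : List Int) : Decidable (Spec_cats_with_hats_optimized num_cats num_rounds out) := by unfold Spec_cats_with_hats_optimized; infer_instance

-- ===== CLAIM (what is proved, stated in full; the proofs are below) =====
def Claim_equal_cats_with_hats_optimized : Prop := ∀ (num_cats : Int) (num_rounds : Int), Dom_cats_with_hats_optimized num_cats num_rounds → Spec_cats_with_hats_optimized num_cats num_rounds (cats_with_hats_optimized num_cats num_rounds)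

-- ===== LEMMAS AND PROOFS =====

-- A's closing comprehension loop, written with enumerate
theorem foldl_enum_comp (cats : List Bool) (acc : List Int) (i0 : Int) :
    (cats.foldl (fun (p : List Int × Int) has_hat =>
        ((if has_hat then p.1 ++ [p.2 + 1] else p.1), p.2 + 1)) (acc, i0)).1
      = acc ++ ((PySem.List.enumerate cats i0).filter (fun q => q.2)).map (fun q => q.1 + 1) := by
  induction cats generalizing acc i0 with
  | nil => simp [PySem.List.enumerate_nil]
  | cons c cs ih =>
    rw [List.foldl_cons, PySem.List.enumerate_cons]
    cases c
    · simp only [if_false, List.filter_cons, decide_false, Bool.false_eq_true]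
      rw [ih]
    · simp only [if_true, List.filter_cons, decide_true]
      rw [ih]
      simp [List.append_assoc]

-- toggling any index of the empty list is a no-op
theorem pvToggle_nil (i : Int) : pvToggle [] i = [] := by
  simp [pvToggle, PySem.List.pySetD, PySem.List.pySet?, PySem.List.pyIdx?]
  rcases i with n | n <;> rfl

theorem length_pvToggle (l : List Bool) (i : Int) :
    (pvToggle l i).length = l.length := by
  simp [pvToggle, PySem.List.length_pySetD]

theorem length_foldl_pvToggle (ds : List Int) (l : List Bool) :
    (ds.foldl pvToggle l).length = l.length := by
  induction ds generalizing l with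
  | nil => rfl
  | cons d ds ih => simp [List.foldl_cons, ih, length_pvToggle]

theorem length_outer_foldl (rs : List Int) (b : Int) (l : List Bool) :
    (rs.foldl (fun cats round =>
        (PySem.List.pyRange (round - 1) b round).foldl pvToggle cats) l).length = l.length := by
  induction rs generalizing l with
  | nil => rfl
  | cons r rs ih => simp [List.foldl_cons, ih, length_foldl_pvToggle]

theorem foldl_pvToggle_nil (ds : List Int) : ds.foldl pvToggle [] = [] := by
  induction ds with
  | nil => rfl
  | cons d ds ih => simp [List.foldl_cons, pvToggle_nil, ih]

-- folding toggles over a nodup list of in-range indices flips exactly those indices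
theorem foldl_pvToggle_getD (ds : List Int) (l : List Bool) (hd : ds.Nodup)
    (hb : ∀ d ∈ ds, 0 ≤ d ∧ d < (l.length : Int)) (i : Nat) (hi : i < l.length) :
    (ds.foldl pvToggle l).getD i false =
      (if (i : Int) ∈ ds then !(l.getD i false) else l.getD i false) := by
  induction ds generalizing l with
  | nil => simp
  | cons d ds ih =>
    obtain ⟨hd0, hdlt⟩ := hb d (List.mem_cons_self ..)
    have hstep : pvToggle l d = l.set d.toNat (!(l.getD d.toNat false)) := by
      rw [pvToggle, PySem.List.pySetD_of_nonneg _ _ hd0,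
        PySem.List.pyGetD_of_nonneg _ _ hd0]
    have hlen : (pvToggle l d).length = l.length := length_pvToggle l d
    rw [List.foldl_cons, ih (pvToggle l d) hd.of_cons (by
      intro e he; rw [hlen]; exact hb e (List.mem_cons_of_mem _ he)) (by omega)]
    have hget : ∀ j : Nat, j < l.length → (pvToggle l d).getD j false =
        (if j = d.toNat then !(l.getD j false) else l.getD j false) := by
      intro j hjl
      rw [hstep]
      by_cases hj : j = d.toNat
      · subst hj
        simp [List.getD, hjl]
      · simp [List.getD, hj, Ne.symm hj]
    rw [hget i hi]
    have hdn : ((i : Int) = d) ↔ i = d.toNat := by omega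
    by_cases hj : i = d.toNat
    · have hid : (i : Int) = d := hdn.mpr hj
      have hni : ¬((i : Int) ∈ ds) := fun hm => (List.nodup_cons.mp hd).1 (hid ▸ hm)
      rw [if_neg hni, if_pos hj, if_pos (List.mem_cons.mpr (Or.inl hid))]
    · have hid : (i : Int) ≠ d := fun h => hj (hdn.mp h)
      by_cases hmem : (i : Int) ∈ ds
      · rw [if_pos hmem, if_neg hj, if_pos (List.mem_cons.mpr (Or.inr hmem))]
      · rw [if_neg hmem, if_neg hj,
          if_neg (by rw [List.mem_cons]; rintro (h | h) <;> [exact hid h; exact hmem h])]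

-- pyRange with positive step has no duplicates
theorem nodup_pyRange_pos (a b s : Int) (hs : 0 < s) :
    (PySem.List.pyRange a b s).Nodup := by
  rw [PySem.List.pyRange_of_pos a b hs]
  refine (List.nodup_range).map ?_
  intro x y h
  have h2 : s * (x : Int) = s * y := by linarith
  have := mul_left_cancel₀ (by omega : (s : Int) ≠ 0) h2
  exact_mod_cast this

-- one round r toggles exactly the cats whose number i+1 is divisible by r
theorem round_getD (r : Int) (hr : 1 ≤ r) (n : Nat) (l : List Bool)
    (hl : l.length = n) (i : Nat) (hi : i < n) :
    ((PySem.List.pyRange (r - 1) (n : Int) r).foldl pvToggle l).getD i false =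
      (if r ∣ ((i : Int) + 1) then !(l.getD i false) else l.getD i false) := by
  rw [foldl_pvToggle_getD _ _ (nodup_pyRange_pos _ _ _ (by omega))
      (by
        intro d hdmem
        have := (PySem.List.mem_pyRange_iff_of_pos (by omega : (0:Int) < r) d).mp hdmem
        constructor <;> omega) i (by omega)]
  have hmem : ((i : Int) ∈ PySem.List.pyRange (r - 1) (n : Int) r) ↔ r ∣ ((i : Int) + 1) := by
    rw [PySem.List.mem_pyRange_iff_of_pos (by omega : (0:Int) < r)]
    constructor
    · rintro ⟨h1, h2, k, hk⟩
      exact ⟨k + 1, by linear_combination hk⟩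
    · rintro ⟨k, hk⟩
      have hrle : r ≤ (i : Int) + 1 := Int.le_of_dvd (by omega) ⟨k, hk⟩
      exact ⟨by omega, by omega, k - 1, by linear_combination hk⟩
  simp only [hmem]

-- the state after rounds 1..R: cat i is on iff i+1 has an odd number of divisors ≤ R
theorem state_getD (n : Nat) (R : Nat) (i : Nat) (hi : i < n) :
    ((PySem.List.pyRange 1 ((R : Int) + 1) 1).foldl
        (fun cats round => (PySem.List.pyRange (round - 1) (n : Int) round).foldl pvToggle cats)
        (List.replicate n false)).getD i false =
      decide (((PySem.List.pyRange 1 ((R : Int) + 1) 1).countP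
          (fun r => decide (r ∣ ((i : Int) + 1)))) % 2 = 1) := by
  induction R with
  | zero =>
    rw [PySem.List.pyRange_one_eq_nil (by omega)]
    simp
  | succ R ih =>
    have hsplit : PySem.List.pyRange 1 (((R : Nat) + 1 : Int) + 1) 1 =
        PySem.List.pyRange 1 ((R : Int) + 1) 1 ++ [(R : Int) + 1] := by
      exact PySem.List.pyRange_one_succ_right (by omega)
    have hlen : ((PySem.List.pyRange 1 ((R : Int) + 1) 1).foldl
        (fun cats round => (PySem.List.pyRange (round - 1) (n : Int) round).foldl pvToggle cats)
        (List.replicate n false)).length = n := by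
      rw [length_outer_foldl, List.length_replicate]
    push_cast
    rw [hsplit, List.foldl_append, List.countP_append, List.foldl_cons, List.foldl_nil,
      round_getD ((R : Int) + 1) (by omega) n _ hlen i hi, ih]
    simp only [List.countP_cons, List.countP_nil, Nat.zero_add]
    set c := (PySem.List.pyRange 1 ((R : Int) + 1) 1).countP
        (fun r => decide (r ∣ ((i : Int) + 1))) with hc0
    by_cases hdvd : ((R : Int) + 1) ∣ ((i : Int) + 1)
    · by_cases hc : c % 2 = 1
      · have h2 : ¬ ((c + 1) % 2 = 1) := by omega
        simp [hdvd, hc, h2]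
      · have h2 : (c + 1) % 2 = 1 := by omega
        simp [hdvd, hc, h2]
    · simp [hdvd]


-- parity of a sum, as xor of parities
theorem decide_parity_add (x y : Nat) :
    decide ((x + y) % 2 = 1) = xor (decide (x % 2 = 1)) (decide (y % 2 = 1)) := by
  by_cases hx : x % 2 = 1 <;> by_cases hy : y % 2 = 1
  · have h : ¬ ((x + y) % 2 = 1) := by omega
    simp [hx, hy, h]
  · have h : (x + y) % 2 = 1 := by omega
    simp [hx, hy, h]
  · have h : (x + y) % 2 = 1 := by omega
    simp [hx, hy, h]
  · have h : ¬ ((x + y) % 2 = 1) := by omega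
    simp [hx, hy, h]

theorem decide_parity_succ (x : Nat) :
    decide ((x + 1) % 2 = 1) = !decide (x % 2 = 1) := by
  by_cases h : x % 2 = 1
  · have h2 : ¬ ((x + 1) % 2 = 1) := by omega
    simp [h, h2]
  · have h2 : (x + 1) % 2 = 1 := by omega
    simp [h, h2]

-- reading an index after one toggle
theorem pvToggle_getD (l : List Bool) (e : Int) (he : 0 ≤ e) (hel : e < (l.length : Int))
    (i : Nat) (hi : i < l.length) :
    (pvToggle l e).getD i false =
      (if (i : Int) = e then !(l.getD i false) else l.getD i false) := by
  rw [pvToggle, PySem.List.pySetD_of_nonneg _ _ he, PySem.List.pyGetD_of_nonneg _ _ he]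
  have hin : ((i : Int) = e) ↔ i = e.toNat := by omega
  by_cases hj : i = e.toNat
  · rw [if_pos (hin.mpr hj)]
    subst hj
    simp [List.getD, hi]
  · rw [if_neg (fun h => hj (hin.mp h))]
    simp [List.getD, Ne.symm hj]

-- reading an index after one conditional toggle
theorem condToggle_getD (c : Prop) [Decidable c] (l : List Bool) (e : Int) (he : 0 ≤ e)
    (hel : e < (l.length : Int)) (i : Nat) (hi : i < l.length) :
    ((if c then pvToggle l e else l).getD i false) =
      xor (decide (c ∧ (i : Int) = e)) (l.getD i false) := by
  by_cases hc : c
  · rw [if_pos hc, pvToggle_getD l e he hel i hi]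
    by_cases hie : (i : Int) = e <;> simp [hc, hie]
  · rw [if_neg hc]
    simp [hc]

-- B's inner loop body preserves length
theorem length_innerBody (num_rounds d : Int) (q : Int) (l : List Bool) :
    ((fun parity q =>
        let parity' := if d ≤ num_rounds then pvToggle parity (d * q - 1) else parity
        if q ≤ num_rounds ∧ q ≠ d then pvToggle parity' (d * q - 1) else parity') l q).length
      = l.length := by
  simp only []
  split_ifs <;> simp [length_pvToggle]

-- reading an index after B's inner loop: each matching toggle event flips it once
theorem innerB_getD (num_rounds d : Int) (qs : List Int) (l : List Bool)
    (hb : ∀ q ∈ qs, 0 ≤ d * q - 1 ∧ d * q - 1 < (l.length : Int)) (i : Nat) (hi : i < l.length) :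
    (qs.foldl (fun parity q =>
        let parity' := if d ≤ num_rounds then pvToggle parity (d * q - 1) else parity
        if q ≤ num_rounds ∧ q ≠ d then pvToggle parity' (d * q - 1) else parity') l).getD i false
      = xor (decide ((qs.countP (fun q => decide ((d ≤ num_rounds) ∧ (i : Int) = d * q - 1))
            + qs.countP (fun q => decide ((q ≤ num_rounds ∧ q ≠ d) ∧ (i : Int) = d * q - 1))) % 2 = 1))
          (l.getD i false) := by
  induction qs generalizing l with
  | nil => simp
  | cons q qs ih =>
    obtain ⟨hq0, hqlt⟩ := hb q (List.mem_cons_self ..)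
    set body := (fun (parity : List Bool) (q : Int) =>
        let parity' := if d ≤ num_rounds then pvToggle parity (d * q - 1) else parity
        if q ≤ num_rounds ∧ q ≠ d then pvToggle parity' (d * q - 1) else parity') with hbody
    have hlb : (body l q).length = l.length := length_innerBody num_rounds d q l
    rw [List.foldl_cons, ih (body l q)
      (by intro e he; rw [hlb]; exact hb e (List.mem_cons_of_mem _ he)) (by omega)]
    have hl1 : (if d ≤ num_rounds then pvToggle l (d * q - 1) else l).length = l.length := by
      split_ifs <;> simp [length_pvToggle]
    have hgd : (body l q).getD i false =
        xor (decide ((q ≤ num_rounds ∧ q ≠ d) ∧ (i : Int) = d * q - 1))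
          (xor (decide ((d ≤ num_rounds) ∧ (i : Int) = d * q - 1)) (l.getD i false)) := by
      rw [hbody]
      simp only []
      rw [condToggle_getD (q ≤ num_rounds ∧ q ≠ d) _ (d * q - 1) hq0 (by omega) i (by omega),
        condToggle_getD (d ≤ num_rounds) l (d * q - 1) hq0 hqlt i hi]
    rw [hgd]
    simp only [List.countP_cons]
    set a := qs.countP (fun q => decide ((d ≤ num_rounds) ∧ (i : Int) = d * q - 1)) with ha
    set b := qs.countP (fun q => decide ((q ≤ num_rounds ∧ q ≠ d) ∧ (i : Int) = d * q - 1)) with hbdef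
    have hsum : (a + (if decide ((d ≤ num_rounds) ∧ (i : Int) = d * q - 1) = true then 1 else 0))
        + (b + (if decide ((q ≤ num_rounds ∧ q ≠ d) ∧ (i : Int) = d * q - 1) = true then 1 else 0))
        = (a + b) + ((if decide ((d ≤ num_rounds) ∧ (i : Int) = d * q - 1) = true then 1 else 0)
            + (if decide ((q ≤ num_rounds ∧ q ≠ d) ∧ (i : Int) = d * q - 1) = true then 1 else 0)) := by
      omega
    rw [hsum, decide_parity_add]
    generalize (decide ((d ≤ num_rounds) ∧ (i : Int) = d * q - 1)) = b1
    generalize (decide ((q ≤ num_rounds ∧ q ≠ d) ∧ (i : Int) = d * q - 1)) = b2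
    cases b1 <;> cases b2 <;> cases hab : decide ((a + b) % 2 = 1) <;>
      cases hv : l.getD i false <;> simp [← decide_parity_add, decide_parity_succ]

-- B's inner loop preserves length
theorem length_innerB (num_rounds d : Int) (qs : List Int) (l : List Bool) :
    (qs.foldl (fun parity q =>
        let parity' := if d ≤ num_rounds then pvToggle parity (d * q - 1) else parity
        if q ≤ num_rounds ∧ q ≠ d then pvToggle parity' (d * q - 1) else parity') l).length
      = l.length := by
  induction qs generalizing l with
  | nil => rfl
  | cons q qs ih => rw [List.foldl_cons, ih, length_innerBody]

theorem pvXorShuffle (x y v : Bool) : xor x (xor y v) = xor (xor y x) v := by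
  cases x <;> cases y <;> cases v <;> rfl

-- B's outer loop preserves length
theorem length_outerB (num_cats num_rounds : Int) (ds : List Int) (l : List Bool) :
    (ds.foldl (fun parity d =>
        if d * d ≤ num_cats then
          (PySem.List.pyRange d (PySem.Int.floordiv num_cats d + 1) 1).foldl
            (fun parity q =>
              let parity' := if d ≤ num_rounds then pvToggle parity (d * q - 1) else parity
              if q ≤ num_rounds ∧ q ≠ d then pvToggle parity' (d * q - 1) else parity')
            parity
        else parity) l).length = l.length := by
  induction ds generalizing l with
  | nil => rfl
  | cons d ds ih =>
    rw [List.foldl_cons, ih]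
    by_cases hg : d * d ≤ num_cats
    · rw [if_pos hg, length_innerB]
    · rw [if_neg hg]

-- reading an index after B's whole double loop
theorem outerB_getD (num_cats num_rounds : Int) (ds : List Int)
    (hds : ∀ d ∈ ds, 1 ≤ d) (l : List Bool) (hlen : (l.length : Int) = num_cats)
    (i : Nat) (hi : i < l.length) :
    (ds.foldl (fun parity d =>
        if d * d ≤ num_cats then
          (PySem.List.pyRange d (PySem.Int.floordiv num_cats d + 1) 1).foldl
            (fun parity q =>
              let parity' := if d ≤ num_rounds then pvToggle parity (d * q - 1) else parity
              if q ≤ num_rounds ∧ q ≠ d then pvToggle parity' (d * q - 1) else parity')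
            parity
        else parity) l).getD i false
      = xor (decide ((ds.map (fun d =>
            if d * d ≤ num_cats then
              (PySem.List.pyRange d (PySem.Int.floordiv num_cats d + 1) 1).countP
                (fun q => decide ((d ≤ num_rounds) ∧ (i : Int) = d * q - 1))
              + (PySem.List.pyRange d (PySem.Int.floordiv num_cats d + 1) 1).countP
                (fun q => decide ((q ≤ num_rounds ∧ q ≠ d) ∧ (i : Int) = d * q - 1))
            else 0)).sum % 2 = 1)) (l.getD i false) := by
  induction ds generalizing l with
  | nil => simp
  | cons d ds ih =>
    have hd1 : 1 ≤ d := hds d (List.mem_cons_self ..)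
    rw [List.foldl_cons, List.map_cons, List.sum_cons]
    by_cases hg : d * d ≤ num_cats
    · rw [if_pos hg, if_pos hg]
      have hbq : ∀ q ∈ PySem.List.pyRange d (PySem.Int.floordiv num_cats d + 1) 1,
          0 ≤ d * q - 1 ∧ d * q - 1 < (l.length : Int) := by
        intro q hq
        rw [PySem.Int.floordiv_eq_ediv_of_pos (by omega), PySem.List.mem_pyRange_one] at hq
        obtain ⟨hq1, hq2⟩ := hq
        have hq3 : d * q ≤ d * (num_cats / d) :=
          mul_le_mul_of_nonneg_left (by omega) (by omega)
        have hq4 : (num_cats / d) * d ≤ num_cats :=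
          (Int.le_ediv_iff_mul_le (by omega : (0:Int) < d)).mp le_rfl
        have h1 : (1:Int) * 1 ≤ d * q := mul_le_mul (by omega) (by omega) (by omega) (by omega)
        rw [mul_comm] at hq4
        constructor
        · omega
        · omega
      rw [ih (fun e he => hds e (List.mem_cons_of_mem _ he)) _
        (by rw [length_innerB]; exact hlen) (by rw [length_innerB]; exact hi)]
      rw [innerB_getD num_rounds d _ l hbq i hi,
        decide_parity_add, decide_parity_add, decide_parity_add]
      exact pvXorShuffle _ _ _
    · rw [if_neg hg, if_neg hg,
        ih (fun e he => hds e (List.mem_cons_of_mem _ he)) l hlen hi]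
      simp

-- counting a conditioned exact match in a nodup list
theorem countP_and_eq_ite (qs : List Int) (hnd : qs.Nodup) (x : Int)
    (c : Int → Prop) [DecidablePred c] :
    qs.countP (fun q => decide (c q ∧ q = x)) = if x ∈ qs ∧ c x then 1 else 0 := by
  induction qs with
  | nil => simp
  | cons q qs ih =>
    rw [List.countP_cons, ih hnd.of_cons]
    by_cases hq : q = x
    · subst hq
      have hnx : q ∉ qs := (List.nodup_cons.mp hnd).1
      by_cases hc : c q <;> simp [hnx, hc]
    · by_cases hmem : x ∈ qs <;> by_cases hc : c x <;>
        simp [List.mem_cons, hq, Ne.symm hq, hmem, hc]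

-- a countP over the range 1..b as a Finset card
theorem countP_pyRange_card (b : Int) (p : Int → Prop) [DecidablePred p] :
    (PySem.List.pyRange 1 (b + 1) 1).countP (fun x => decide (p x)) =
      ((Finset.Icc (1 : Int) b).filter p).card := by
  rw [List.countP_eq_length_filter,
    ← List.toFinset_card_of_nodup (List.Nodup.filter _ (PySem.List.nodup_pyRange_one 1 (b + 1)))]
  congr 1
  ext x
  rw [List.mem_toFinset, List.mem_filter, Finset.mem_filter, Finset.mem_Icc,
    PySem.List.mem_pyRange_one]
  constructor
  · rintro ⟨⟨h1, h2⟩, hp⟩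
    exact ⟨⟨h1, by omega⟩, of_decide_eq_true hp⟩
  · rintro ⟨⟨h1, h2⟩, hp⟩
    exact ⟨⟨h1, by omega⟩, decide_eq_true hp⟩

-- splitting the divisors of m that are ≤ R into small (d·d ≤ m) divisors and the
-- co-divisors m/d of small divisors d
theorem divisor_pair_count (m n R : Int) (hm : 1 ≤ m) (hmn : m ≤ n) :
    ((Finset.Icc (1 : Int) n).filter (fun d => d ∣ m ∧ d * d ≤ m ∧ d ≤ R)).card
      + ((Finset.Icc (1 : Int) n).filter
          (fun d => d ∣ m ∧ d * d ≤ m ∧ m / d ≤ R ∧ m / d ≠ d)).card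
      = ((Finset.Icc (1 : Int) R).filter (fun e => e ∣ m)).card := by
  have hsplit := Finset.card_filter_add_card_filter_not
    (s := (Finset.Icc (1 : Int) R).filter (fun e => e ∣ m)) (fun e => e * e ≤ m)
  rw [Finset.filter_filter, Finset.filter_filter] at hsplit
  rw [← hsplit]
  congr 1
  · -- small divisors: the two sets are equal
    congr 1
    ext d
    simp only [Finset.mem_filter, Finset.mem_Icc]
    constructor
    · rintro ⟨⟨ha, _⟩, hd, hsq, hR⟩
      exact ⟨⟨ha, hR⟩, hd, hsq⟩
    · rintro ⟨⟨ha, hR⟩, hd, hsq⟩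
      exact ⟨⟨ha, le_trans (Int.le_of_dvd (by omega) hd) hmn⟩, hd, hsq, hR⟩
  · -- large divisors: bijection d ↦ m / d
    apply Finset.card_nbij' (i := fun d => m / d) (j := fun e => m / e)
    · intro d hd
      simp only [Finset.coe_filter, Set.mem_setOf_eq, Finset.mem_Icc] at hd ⊢
      obtain ⟨⟨h1d, _⟩, hdvd, hsq, hRle, hne⟩ := hd
      have hde : d * (m / d) = m := Int.mul_ediv_cancel' hdvd
      have hepos : 1 ≤ m / d := by nlinarith [hde]
      have hdle : d ≤ m / d := (Int.le_ediv_iff_mul_le (by omega)).mpr (by nlinarith)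
      have hdlt : d < m / d := lt_of_le_of_ne hdle (Ne.symm hne)
      have hbig : m < m / d * (m / d) := by nlinarith
      exact ⟨⟨hepos, hRle⟩, ⟨d, by nlinarith⟩, by omega⟩
    · intro e he
      simp only [Finset.coe_filter, Set.mem_setOf_eq, Finset.mem_Icc] at he ⊢
      obtain ⟨⟨h1e, heR⟩, hdvd, hbig⟩ := he
      have hde : e * (m / e) = m := Int.mul_ediv_cancel' hdvd
      have hdpos : 1 ≤ m / e := by nlinarith [hde]
      have hdlt : m / e < e := by nlinarith
      have hrec : m / (m / e) = e := by
        have h := Int.mul_ediv_cancel e (show m / e ≠ 0 by omega)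
        rw [hde] at h
        exact h
      have hddvd : m / e ∣ m := ⟨e, by nlinarith⟩
      have hdn : m / e ≤ n := le_trans (Int.le_of_dvd (by omega) hddvd) hmn
      refine ⟨⟨hdpos, hdn⟩, hddvd, by nlinarith, by rw [hrec]; exact heR, by rw [hrec]; omega⟩
    · intro d hd
      simp only [Finset.coe_filter, Set.mem_setOf_eq, Finset.mem_Icc] at hd
      obtain ⟨⟨h1d, _⟩, hdvd, hsq, hRle, hne⟩ := hd
      have hde : d * (m / d) = m := Int.mul_ediv_cancel' hdvd
      have hepos : 1 ≤ m / d := by nlinarith [hde]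
      show m / (m / d) = d
      have h := Int.mul_ediv_cancel d (show m / d ≠ 0 by omega)
      rw [hde] at h
      exact h
    · intro e he
      simp only [Finset.coe_filter, Set.mem_setOf_eq, Finset.mem_Icc] at he
      obtain ⟨⟨h1e, heR⟩, hdvd, hbig⟩ := he
      have hde : e * (m / e) = m := Int.mul_ediv_cancel' hdvd
      have hdpos : 1 ≤ m / e := by nlinarith [hde]
      show m / (m / e) = e
      have h := Int.mul_ediv_cancel e (show m / e ≠ 0 by omega)
      rw [hde] at h
      exact h

-- one outer iteration of B contributes its small-divisor and co-divisor matches of m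
theorem contrib_eq (num_cats num_rounds m d : Int) (hm1 : 1 ≤ m) (hmn : m ≤ num_cats)
    (hd1 : 1 ≤ d) :
    (if d * d ≤ num_cats then
        (PySem.List.pyRange d (PySem.Int.floordiv num_cats d + 1) 1).countP
          (fun q => decide ((d ≤ num_rounds) ∧ m = d * q))
        + (PySem.List.pyRange d (PySem.Int.floordiv num_cats d + 1) 1).countP
          (fun q => decide ((q ≤ num_rounds ∧ q ≠ d) ∧ m = d * q))
      else 0)
    = (if d ∣ m ∧ d * d ≤ m ∧ d ≤ num_rounds then 1 else 0)
      + (if d ∣ m ∧ d * d ≤ m ∧ m / d ≤ num_rounds ∧ m / d ≠ d then 1 else 0) := by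
  by_cases hg : d * d ≤ num_cats
  case neg =>
    rw [if_neg hg, if_neg (fun h => hg (le_trans h.2.1 hmn)),
      if_neg (fun h => hg (le_trans h.2.1 hmn))]
  case pos =>
    rw [if_pos hg, PySem.Int.floordiv_eq_ediv_of_pos (by omega : (0:Int) < d)]
    by_cases hdvd : d ∣ m
    · have hde : d * (m / d) = m := Int.mul_ediv_cancel' hdvd
      have hiff : ∀ q : Int, (m = d * q) ↔ (q = m / d) := by
        intro q
        constructor
        · intro h
          have h2 := Int.mul_ediv_cancel_left q (show d ≠ 0 by omega)
          rw [← h] at h2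
          omega
        · intro h; rw [h, hde]
      have hc1 : (PySem.List.pyRange d (num_cats / d + 1) 1).countP
            (fun q => decide ((d ≤ num_rounds) ∧ m = d * q))
          = (PySem.List.pyRange d (num_cats / d + 1) 1).countP
            (fun q => decide ((d ≤ num_rounds) ∧ q = m / d)) :=
        List.countP_congr (fun q _ => by simp [hiff q])
      have hc2 : (PySem.List.pyRange d (num_cats / d + 1) 1).countP
            (fun q => decide ((q ≤ num_rounds ∧ q ≠ d) ∧ m = d * q))
          = (PySem.List.pyRange d (num_cats / d + 1) 1).countP
            (fun q => decide ((q ≤ num_rounds ∧ q ≠ d) ∧ q = m / d)) :=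
        List.countP_congr (fun q _ => by simp [hiff q])
      rw [hc1, hc2,
        countP_and_eq_ite _ (PySem.List.nodup_pyRange_one ..) _ (fun q => d ≤ num_rounds),
        countP_and_eq_ite _ (PySem.List.nodup_pyRange_one ..) _ (fun q => q ≤ num_rounds ∧ q ≠ d)]
      have hmem : (m / d ∈ PySem.List.pyRange d (num_cats / d + 1) 1) ↔ d * d ≤ m := by
        rw [PySem.List.mem_pyRange_one]
        constructor
        · rintro ⟨hq1, _⟩
          nlinarith [hde]
        · intro hsq
          have ha : d ≤ m / d := (Int.le_ediv_iff_mul_le (by omega)).mpr hsq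
          have hb : m / d ≤ num_cats / d := Int.ediv_le_ediv (by omega) hmn
          exact ⟨ha, by omega⟩
      by_cases hsq : d * d ≤ m <;>
        by_cases hr1 : d ≤ num_rounds <;>
          by_cases hr2 : m / d ≤ num_rounds ∧ m / d ≠ d <;>
            simp [hmem, hdvd, hsq, hr1, hr2]
    · have hz : ∀ (c : Int → Prop) (hc : DecidablePred c),
          (PySem.List.pyRange d (num_cats / d + 1) 1).countP
            (fun q => decide (c q ∧ m = d * q)) = 0 := by
        intro c hc
        rw [List.countP_eq_zero]
        intro q _
        simp only [decide_eq_true_eq]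
        rintro ⟨-, h⟩
        exact hdvd ⟨q, h⟩
      rw [hz _ _, hz _ _]
      simp [hdvd]

-- a sum of per-element 0/1/2 contributions as two countP's
theorem sum_map_eq_countP_two (ds : List Int) (f : Int → Nat) (p1 p2 : Int → Prop)
    [DecidablePred p1] [DecidablePred p2]
    (h : ∀ d ∈ ds, f d = (if p1 d then 1 else 0) + (if p2 d then 1 else 0)) :
    (ds.map f).sum = ds.countP (fun d => decide (p1 d)) + ds.countP (fun d => decide (p2 d)) := by
  induction ds with
  | nil => simp
  | cons d ds ih =>
    rw [List.map_cons, List.sum_cons, List.countP_cons, List.countP_cons,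
      h d (List.mem_cons_self ..), ih (fun e he => h e (List.mem_cons_of_mem _ he))]
    by_cases h1 : p1 d <;> by_cases h2 : p2 d <;> simp [h1, h2] <;> omega

-- the parity array after B's double loop: slot i is marked iff cat i+1 has an odd
-- number of divisors ≤ num_rounds
theorem stateB_getD (num_cats num_rounds : Int) (hnc : 1 ≤ num_cats) (i : Nat)
    (hile : (i : Int) < num_cats) :
    ((PySem.List.pyRange 1 (num_cats + 1) 1).foldl
        (fun parity d =>
          if d * d ≤ num_cats then
            (PySem.List.pyRange d (PySem.Int.floordiv num_cats d + 1) 1).foldl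
              (fun parity q =>
                let parity' := if d ≤ num_rounds then pvToggle parity (d * q - 1) else parity
                if q ≤ num_rounds ∧ q ≠ d then pvToggle parity' (d * q - 1) else parity')
              parity
          else parity)
        (List.replicate num_cats.toNat false)).getD i false
      = decide ((PySem.List.pyRange 1 (num_rounds + 1) 1).countP
          (fun r => decide (r ∣ ((i : Int) + 1))) % 2 = 1) := by
  have hlen : (((List.replicate num_cats.toNat false).length : Int)) = num_cats := by
    simp; omega
  have hi : i < (List.replicate num_cats.toNat false).length := by
    simp; omega
  rw [outerB_getD num_cats num_rounds _
      (fun d hd => ((PySem.List.mem_pyRange_one).mp hd).1) _ hlen i hi]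
  have hrep : (List.replicate num_cats.toNat false).getD i false = false := by
    simp [List.getD]
  rw [hrep, Bool.xor_false]
  congr 1
  -- restate the match i = d·q - 1 as i + 1 = d·q
  have hmapc : ((PySem.List.pyRange 1 (num_cats + 1) 1).map (fun d =>
      if d * d ≤ num_cats then
        (PySem.List.pyRange d (PySem.Int.floordiv num_cats d + 1) 1).countP
          (fun q => decide ((d ≤ num_rounds) ∧ (i : Int) = d * q - 1))
        + (PySem.List.pyRange d (PySem.Int.floordiv num_cats d + 1) 1).countP
          (fun q => decide ((q ≤ num_rounds ∧ q ≠ d) ∧ (i : Int) = d * q - 1))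
      else 0)) = ((PySem.List.pyRange 1 (num_cats + 1) 1).map (fun d =>
      if d * d ≤ num_cats then
        (PySem.List.pyRange d (PySem.Int.floordiv num_cats d + 1) 1).countP
          (fun q => decide ((d ≤ num_rounds) ∧ (i : Int) + 1 = d * q))
        + (PySem.List.pyRange d (PySem.Int.floordiv num_cats d + 1) 1).countP
          (fun q => decide ((q ≤ num_rounds ∧ q ≠ d) ∧ (i : Int) + 1 = d * q))
      else 0)) := by
    apply List.map_congr_left
    intro d _
    by_cases hg : d * d ≤ num_cats
    · rw [if_pos hg, if_pos hg]
      congr 1 <;>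
        · apply List.countP_congr
          intro q _
          simp only [decide_eq_true_eq]
          constructor
          · rintro ⟨h1, h2⟩; exact ⟨h1, by omega⟩
          · rintro ⟨h1, h2⟩; exact ⟨h1, by omega⟩
    · rw [if_neg hg, if_neg hg]
  rw [hmapc]
  rw [sum_map_eq_countP_two _ _
      (fun d => d ∣ ((i : Int) + 1) ∧ d * d ≤ ((i : Int) + 1) ∧ d ≤ num_rounds)
      (fun d => d ∣ ((i : Int) + 1) ∧ d * d ≤ ((i : Int) + 1) ∧
        ((i : Int) + 1) / d ≤ num_rounds ∧ ((i : Int) + 1) / d ≠ d)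
      (fun d hd => contrib_eq num_cats num_rounds ((i : Int) + 1) d (by omega) (by omega)
        ((PySem.List.mem_pyRange_one).mp hd).1)]
  rw [countP_pyRange_card num_cats, countP_pyRange_card num_cats,
    countP_pyRange_card num_rounds,
    divisor_pair_count ((i : Int) + 1) num_cats num_rounds (by omega) (by omega)]

-- ===== VERDICT (by name: the statement is the Claim_ definition above) =====
theorem cats_with_hats_optimized_spec : Claim_equal_cats_with_hats_optimized := by
  intro num_cats num_rounds _
  simp only [Spec_cats_with_hats_optimized, cats_with_hats_optimized,
    cats_with_hats_optimized_alt]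
  by_cases hnc : num_cats ≤ 0
  · -- no cats on either side
    have h0 : num_cats.toNat = 0 := by omega
    have hfold : ∀ rs : List Int,
        rs.foldl (fun cats round =>
          (PySem.List.pyRange (round - 1) num_cats round).foldl pvToggle cats)
          ([] : List Bool) = [] := by
      intro rs
      induction rs with
      | nil => rfl
      | cons r rs ih => simpa [List.foldl_cons, foldl_pvToggle_nil] using ih
    rw [h0, List.replicate_zero, hfold,
      PySem.List.pyRange_one_eq_nil (by omega : num_cats + 1 ≤ 1)]
    rfl
  · -- at least one cat
    have hn0 : 0 < num_cats := by omega
    obtain ⟨n, hn⟩ : ∃ n : Nat, (n : Int) = num_cats :=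
      ⟨num_cats.toNat, Int.toNat_of_nonneg (by omega)⟩
    obtain ⟨R, hR⟩ : ∃ R : Nat, PySem.List.pyRange 1 (num_rounds + 1) 1 =
        PySem.List.pyRange 1 ((R : Int) + 1) 1 := by
      by_cases hr : 0 ≤ num_rounds
      · exact ⟨num_rounds.toNat, by rw [Int.toNat_of_nonneg hr]⟩
      · exact ⟨0, by rw [PySem.List.pyRange_one_eq_nil (by omega),
          PySem.List.pyRange_one_eq_nil (by omega)]⟩
    rw [← hn, hR]
    have hnat : ((n : Int)).toNat = n := by omega
    rw [hnat]
    set cats := (PySem.List.pyRange 1 ((R : Int) + 1) 1).foldl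
      (fun cats round => (PySem.List.pyRange (round - 1) ((n : Nat) : Int) round).foldl pvToggle cats)
      (List.replicate n false) with hcats
    have hclen : cats.length = n := by
      rw [hcats, length_outer_foldl, List.length_replicate]
    set parity := (PySem.List.pyRange 1 ((n : Int) + 1) 1).foldl
        (fun parity d =>
          if d * d ≤ (n : Int) then
            (PySem.List.pyRange d (PySem.Int.floordiv (n : Int) d + 1) 1).foldl
              (fun parity q =>
                let parity' := if d ≤ num_rounds then pvToggle parity (d * q - 1) else parity
                if q ≤ num_rounds ∧ q ≠ d then pvToggle parity' (d * q - 1) else parity')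
              parity
          else parity)
        (List.replicate n false) with hparity
    have hplen : parity.length = n := by
      rw [hparity, length_outerB, List.length_replicate]
    -- A's comprehension as a filter over the index range
    rw [foldl_enum_comp cats [] 0, List.nil_append]
    rw [PySem.List.enumerate_eq_map_pyRange cats false]
    rw [List.filter_map, List.map_map]
    have hlencast : PySem.List.len cats = ((n : Nat) : Int) := by
      simp [PySem.List.len_eq, hclen]
    rw [hlencast, PySem.List.pyRange_one 0, List.filter_map, List.map_map]
    -- B's comprehension as a filter over the index range
    rw [foldl_enum_comp parity [] 0, List.nil_append]
    rw [PySem.List.enumerate_eq_map_pyRange parity false]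
    rw [List.filter_map, List.map_map]
    have hplencast : PySem.List.len parity = ((n : Nat) : Int) := by
      simp [PySem.List.len_eq, hplen]
    rw [hplencast, PySem.List.pyRange_one 0, List.filter_map, List.map_map]
    have hlen1 : ((n : Int) - 0).toNat = n := by omega
    rw [hlen1]
    -- both sides: map over a filtered List.range n; compare pointwise
    have hfiltereq :
        List.filter (((fun p : Int × Bool => p.2) ∘ fun j => (j, PySem.List.pyGetD cats j false)) ∘ fun k : Nat => 0 + (k : Int)) (List.range n) =
        List.filter (((fun p : Int × Bool => p.2) ∘ fun j => (j, PySem.List.pyGetD parity j false)) ∘ fun k : Nat => 0 + (k : Int)) (List.range n) := by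
      apply List.filter_congr
      intro k hk
      have hkn : k < n := List.mem_range.mp hk
      simp only [Function.comp, zero_add]
      have hL : PySem.List.pyGetD cats (k : Int) false =
          decide (((PySem.List.pyRange 1 ((R : Int) + 1) 1).countP
            (fun r => decide (r ∣ ((k : Int) + 1)))) % 2 = 1) := by
        rw [PySem.List.pyGetD_natCast]
        rw [hcats]
        exact state_getD n R k hkn
      have hB : PySem.List.pyGetD parity (k : Int) false =
          decide (((PySem.List.pyRange 1 ((R : Int) + 1) 1).countP
            (fun r => decide (r ∣ ((k : Int) + 1)))) % 2 = 1) := by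
        rw [PySem.List.pyGetD_natCast, hparity]
        have hsb := stateB_getD ((n : Nat) : Int) num_rounds (by omega) k (by omega)
        rw [hnat] at hsb
        rw [hsb, hR]
      rw [hL, hB]
    rw [hfiltereq]
    apply List.map_congr_left
    intro k _
    simp [Function.comp]
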